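-- pv_equiv track=rewrite | github.com/wyattarnold/neuralhyd-ca | src/lstm/subbasin_dataset.py | _nesting_groups
-- ===== SOURCE A (Python) =====
-- from typing import Dict, List, Tuple
--
-- def _nesting_groups(gauge_subbasins: Dict[int, List[str]]) -> List[List[int]]:
--     """Group gauges that share any subbasin via union-find.
--
--     Two gauges are placed in the same group whenever their subbasin sets
--     intersect — whether by strict nesting (one catchment fully contains
--     the other) or partial overlap (sharing one or more subbasins without
--     containment).  Either case constitutes input leakage: a HUC12 forcing
--     tensor that drives one gauge in training would also drive the other
--     in validation.  Transitivity is handled by union-find.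
--     """
--     gauges = list(gauge_subbasins.keys())
--     sub_sets = {g: set(hs) for g, hs in gauge_subbasins.items()}
--
--     parent = list(range(len(gauges)))
--
--     def find(x: int) -> int:
--         while parent[x] != x:
--             parent[x] = parent[parent[x]]
--             x = parent[x]
--         return x
--
--     def union(x: int, y: int) -> None:
--         parent[find(x)] = find(y)
--
--     for i, a in enumerate(gauges):
--         for j, b in enumerate(gauges[i + 1:], start=i + 1):
--             if sub_sets[a] & sub_sets[b]:   # any shared subbasin = leakage
--                 union(i, j)
--
--     from collections import defaultdict
--     grp: Dict[int, List[int]] = defaultdict(list)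
--     for idx, g in enumerate(gauges):
--         grp[find(idx)].append(g)
--     return list(grp.values())
-- ===== SOURCE B (Python) =====
-- def _nesting_groups(gauge_subbasins):
--     """Group gauges that share any subbasin.
--
--     Inverted-index rewrite: build subbasin -> [gauge indices] buckets once,
--     then union the members of each bucket, instead of intersecting every
--     pair of subbasin sets.
--     """
--     items = list(gauge_subbasins.items())
--     n = len(items)
--
--     buckets = {}
--     for i, (_, hs) in enumerate(items):
--         for h in hs:
--             buckets.setdefault(h, []).append(i)
--
--     parent = list(range(n))
--
--     def find(x):
--         while parent[x] != x:
--             x = parent[x]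
--         return x
--
--     for idxs in buckets.values():
--         for j in idxs[1:]:
--             ra, rb = find(idxs[0]), find(j)
--             if ra != rb:
--                 parent[ra] = rb
--
--     groups = {}
--     for i, (g, _) in enumerate(items):
--         groups.setdefault(find(i), []).append(g)
--     return list(groups.values())
-- ===== Notes on version B (the rewrite author's own statement) =====
-- stated objective: faster
-- what changed: A intersects the subbasin sets of every pair of gauges (O(n^2) set intersections) and uses a path-halving find; B instead builds a subbasin->gauge-indices inverted index once and unions the members of each bucket with a plain root-walk find, so the quadratic pairwise scan disappears.
import Mathlib
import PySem

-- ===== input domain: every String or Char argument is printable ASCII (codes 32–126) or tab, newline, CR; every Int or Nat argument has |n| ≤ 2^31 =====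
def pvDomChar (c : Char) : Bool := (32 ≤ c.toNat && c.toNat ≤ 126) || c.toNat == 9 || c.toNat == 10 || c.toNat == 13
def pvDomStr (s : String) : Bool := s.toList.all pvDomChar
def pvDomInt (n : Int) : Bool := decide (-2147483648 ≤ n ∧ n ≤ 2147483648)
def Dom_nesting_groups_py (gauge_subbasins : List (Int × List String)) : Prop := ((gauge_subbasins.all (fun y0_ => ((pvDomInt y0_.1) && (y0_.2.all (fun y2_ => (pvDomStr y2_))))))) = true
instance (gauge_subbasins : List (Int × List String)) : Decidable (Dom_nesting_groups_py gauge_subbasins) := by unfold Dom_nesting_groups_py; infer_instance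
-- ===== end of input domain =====

-- B replaces A's O(n²) pairwise set-intersection tests by a subbasin→gauge-indices
-- inverted index and unions within each bucket (and uses a plain root-walk find);
-- measurably faster on large inputs. Return values are proved identical.

-- ===== PORT A =====
-- A's find: `while parent[x] != x: parent[x] = parent[parent[x]]; x = parent[x]`
-- (path halving).  The while loop becomes fuel recursion; fuel = len(parent)
-- always suffices (proved in the lemmas below), so the port is exact.
def pvFindA : Nat → List Nat → Nat → List Nat × Nat
  | 0, p, x => (p, x)
  | fuel+1, p, x =>
    if p.getD x x ≠ x then
      let g := p.getD (p.getD x x) (p.getD x x)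
      pvFindA fuel (p.set x g) g
    else (p, x)

-- A's union: `parent[find(x)] = find(y)` (Python evaluates the RHS find(y) first)
def pvUnionA (p : List Nat) (x y : Nat) : List Nat :=
  let fy := pvFindA p.length p y
  let fx := pvFindA fy.1.length fy.1 x
  fx.1.set fx.2 fy.2

def nesting_groups_py (gauge_subbasins : List (Int × List String)) : List (List Int) :=
  let d := PySem.Dict.ofList gauge_subbasins
  let gauges := d.keys
  let subSets : PySem.Dict Int (PySem.Set String) :=
    d.items.foldl (fun sd gh => sd.insert gh.1 (PySem.Set.ofList gh.2)) PySem.Dict.empty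
  let n := gauges.length
  let enumG := (List.range n).zip gauges
  let parent := enumG.foldl (fun p ia =>
      (enumG.drop (ia.1 + 1)).foldl (fun p jb =>
        if PySem.Set.inter (subSets.getD ia.2 []) (subSets.getD jb.2 []) ≠ [] then
          pvUnionA p ia.1 jb.1
        else p) p)
    (List.range n)
  let st := enumG.foldl (fun (st : List Nat × PySem.Dict Nat (List Int)) ig =>
      let f := pvFindA st.1.length st.1 ig.1
      (f.1, st.2.modify f.2 [] (· ++ [ig.2])))
    (parent, PySem.Dict.empty)
  st.2.values

-- ===== PORT B =====
-- B's find: plain walk to the root, no mutation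
def pvFindB : Nat → List Nat → Nat → Nat
  | 0, _, x => x
  | fuel+1, p, x => if p.getD x x ≠ x then pvFindB fuel p (p.getD x x) else x

def nesting_groups_py_alt (gauge_subbasins : List (Int × List String)) : List (List Int) :=
  let items := (PySem.Dict.ofList gauge_subbasins).items
  let n := items.length
  let buckets : PySem.Dict String (List Nat) :=
    ((List.range n).zip items).foldl (fun b ii =>
      ii.2.2.foldl (fun b h => b.modify h [] (· ++ [ii.1])) b) PySem.Dict.empty
  let parent := buckets.values.foldl (fun p idxs =>
      match idxs with
      | [] => p
      | r0 :: rest =>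
        rest.foldl (fun p j =>
          let ra := pvFindB p.length p r0
          let rb := pvFindB p.length p j
          if ra ≠ rb then p.set ra rb else p) p)
    (List.range n)
  let grp := ((List.range n).zip items).foldl (fun (g : PySem.Dict Nat (List Int)) ii =>
      g.modify (pvFindB parent.length parent ii.1) [] (· ++ [ii.2.1])) PySem.Dict.empty
  grp.values

-- ===== PRECONDITION & SPEC =====
def Spec_nesting_groups_py (gauge_subbasins : List (Int × List String)) (out : List (List Int)) : Prop := out = nesting_groups_py_alt gauge_subbasins
instance (gauge_subbasins : List (Int × List String)) (out : List (List Int)) : Decidable (Spec_nesting_groups_py gauge_subbasins out) := by unfold Spec_nesting_groups_py; infer_instance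

-- ===== CLAIM (what is proved, stated in full; the proofs are below) =====
def Claim_equal_nesting_groups_py : Prop := ∀ (gauge_subbasins : List (Int × List String)), Dom_nesting_groups_py gauge_subbasins → Spec_nesting_groups_py gauge_subbasins (nesting_groups_py gauge_subbasins)

-- ===== LEMMAS AND PROOFS =====

/- Union-find model: a parent list `p : List Nat`; out-of-range reads default to
   the index itself, exactly like the ports' `p.getD x x`. -/
def ufStep (p : List Nat) (x : Nat) : Nat := p.getD x x

def ufIter (p : List Nat) : Nat → Nat → Nat
  | 0, x => x
  | k+1, x => ufIter p k (ufStep p x)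

/-- every chain reaches a fixpoint -/
def ufInv (p : List Nat) : Prop := ∀ x, ∃ k, ufStep p (ufIter p k x) = ufIter p k x

/-- in-range entries stay in range -/
def ufBnd (p : List Nat) : Prop := ∀ i, i < p.length → ufStep p i < p.length

/-- canonical root: iterate length-many times (enough under `ufInv`) -/
def ufRoot (p : List Nat) (x : Nat) : Nat := ufIter p p.length x

def ufJoin (R : Nat → Nat → Prop) (a b : Nat) (y z : Nat) : Prop :=
  R y z ∨ (R y a ∧ R b z) ∨ (R y b ∧ R a z)

def ufConn (ps : List (Nat × Nat)) (y z : Nat) : Prop :=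
  Relation.EqvGen (fun a b => (a, b) ∈ ps ∨ (b, a) ∈ ps) y z

lemma ufIter_add (p : List Nat) (a b x : Nat) :
    ufIter p (a + b) x = ufIter p b (ufIter p a x) := by
  induction a generalizing x with
  | zero => simp [ufIter]
  | succ a ih => rw [Nat.succ_add]; exact ih (ufStep p x)

lemma ufIter_root {p : List Nat} {r : Nat} (h : ufStep p r = r) (k : Nat) :
    ufIter p k r = r := by
  induction k with
  | zero => rfl
  | succ k ih => rw [ufIter, h]; exact ih

lemma uf_nonroot_lt {p : List Nat} {x : Nat} (h : ufStep p x ≠ x) : x < p.length := by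
  by_contra hge
  unfold ufStep at h
  exact h (List.getD_eq_default p x (by omega))

lemma ufRoot_isRoot {p : List Nat} (h : ufInv p) (x : Nat) :
    ufStep p (ufRoot p x) = ufRoot p x := by
  obtain ⟨k0, hk0⟩ := h x
  have hex : ∃ k, ufStep p (ufIter p k x) = ufIter p k x := ⟨k0, hk0⟩
  have hroot : ufStep p (ufIter p (Nat.find hex) x) = ufIter p (Nat.find hex) x :=
    Nat.find_spec hex
  set k := Nat.find hex with hkdef
  by_cases hkn : k ≤ p.length
  · have h1 : ufRoot p x = ufIter p (p.length - k) (ufIter p k x) := by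
      rw [ufRoot, ← ufIter_add]; congr 1; omega
    rw [h1, ufIter_root hroot]; exact hroot
  · exfalso
    have key : ∀ i j : Nat, i < j → j ≤ k → ufIter p i x = ufIter p j x → False := by
      intro i j hij hjk heq
      have h2 : ufIter p (i + (k - j)) x = ufIter p k x := by
        rw [ufIter_add, heq, ← ufIter_add]; congr 1; omega
      have h3 : ufStep p (ufIter p (i + (k - j)) x) = ufIter p (i + (k - j)) x := by
        rw [h2]; exact hroot
      exact Nat.find_min hex (show i + (k - j) < k by omega) h3
    have hnr : ∀ i, i < k → ufStep p (ufIter p i x) ≠ ufIter p i x := by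
      intro i hik; exact Nat.find_min hex hik
    have hlt : ∀ i, i < k → ufIter p i x < p.length := fun i hik => uf_nonroot_lt (hnr i hik)
    have hinj : Function.Injective
        (fun i : Fin (p.length + 1) => (⟨ufIter p (i : Nat) x, hlt i (by omega)⟩ : Fin p.length)) := by
      intro i j hf
      have heq : ufIter p (i : Nat) x = ufIter p (j : Nat) x := congrArg Fin.val hf
      rcases lt_trichotomy (i : Nat) (j : Nat) with hlt' | he | hgt
      · exact (key i j hlt' (by omega) heq).elim
      · exact Fin.ext he
      · exact (key j i hgt (by omega) heq.symm).elim
    have hcard := Fintype.card_le_of_injective _ hinj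
    simp [Fintype.card_fin] at hcard

lemma ufRoot_of_root {p : List Nat} {x : Nat} (h : ufStep p x = x) : ufRoot p x = x :=
  ufIter_root h p.length

lemma ufRoot_step {p : List Nat} (h : ufInv p) (x : Nat) :
    ufRoot p (ufStep p x) = ufRoot p x := by
  have h1 : ufRoot p (ufStep p x) = ufIter p (p.length + 1) x := rfl
  rw [h1, ufIter_add p p.length 1 x]
  exact ufRoot_isRoot h x

lemma ufRoot_iter {p : List Nat} (h : ufInv p) (k x : Nat) :
    ufRoot p (ufIter p k x) = ufRoot p x := by
  induction k generalizing x with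
  | zero => rfl
  | succ k ih => rw [ufIter, ih (ufStep p x), ufRoot_step h]

lemma ufRoot_of_rootedAt {p : List Nat} (h : ufInv p) {k x r : Nat}
    (hk : ufIter p k x = r) (hr : ufStep p r = r) : ufRoot p x = r := by
  rw [← ufRoot_iter h k x, hk, ufRoot_of_root hr]

lemma uf_step_set (p : List Nat) (x t y : Nat) :
    ufStep (p.set x t) y = if y = x ∧ x < p.length then t else ufStep p y := by
  simp only [ufStep, List.getD, List.getElem?_set]
  split_ifs with h1 h2 h3 h3 <;> simp_all

lemma uf_set_noop {p : List Nat} {x t : Nat} (h : ufStep p x = t) : p.set x t = p := by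
  apply List.ext_getElem?
  intro i
  rw [List.getElem?_set]
  split_ifs with h1 h2
  · subst h1; subst h
    simp [ufStep, List.getD, List.getElem?_eq_getElem h2]
  · subst h1; exact (List.getElem?_eq_none (by omega)).symm
  · rfl

lemma uf_bnd_iter {p : List Nat} (hB : ufBnd p) {x : Nat} (hx : x < p.length) (k : Nat) :
    ufIter p k x < p.length := by
  induction k generalizing x with
  | zero => exact hx
  | succ k ih => exact ih (hB x hx)

lemma uf_no_return {p : List Nat} {m x : Nat}
    (hm : ufStep p (ufIter p m x) = ufIter p m x) (hx : ufStep p x ≠ x)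
    {k : Nat} (hk : 1 ≤ k) : ufIter p k x ≠ x := by
  intro heq
  have hmul : ∀ q, ufIter p (q * k) x = x := by
    intro q
    induction q with
    | zero => rw [Nat.zero_mul]; rfl
    | succ q ih => rw [Nat.succ_mul, ufIter_add, ih, heq]
  have hm1 : 1 ≤ m := by
    rcases Nat.eq_zero_or_pos m with h0 | h
    · exfalso; apply hx; rw [h0] at hm; exact hm
    · exact h
  have h2 : ufIter p (m * k) x = ufIter p m x := by
    have hsplit : m * k = m + (m * k - m) := by
      have : m ≤ m * k := Nat.le_mul_of_pos_right m hk
      omega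
    rw [hsplit, ufIter_add, ufIter_root hm]
  have hx2 : ufIter p m x = x := by rw [← h2, hmul m]
  apply hx
  conv_lhs => rw [← hx2]
  rw [hm, hx2]

lemma uf_iter_set_avoid {p : List Nat} {x t y : Nat} {k : Nat}
    (hav : ∀ s, s < k → ufIter p s y ≠ x) :
    ufIter (p.set x t) k y = ufIter p k y := by
  induction k generalizing y with
  | zero => rfl
  | succ k ih =>
    have hy : y ≠ x := by
      have := hav 0 (Nat.succ_pos k); simpa [ufIter] using this
    have hstep : ufStep (p.set x t) y = ufStep p y := by
      rw [uf_step_set]; simp [hy]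
    rw [ufIter, hstep, ufIter]
    exact ih (fun s hs => by
      have := hav (s + 1) (by omega)
      simpa [ufIter_add p 1 s y] using this)

lemma uf_compress_core {p : List Nat} (hI : ufInv p) {x : Nat}
    (hx : ufStep p x ≠ x) {j : Nat} (hj : 1 ≤ j) :
    ∀ (m y : Nat), ufStep p (ufIter p m y) = ufIter p m y →
      ∃ k, ufIter (p.set x (ufIter p j x)) k y = ufRoot p y := by
  have hxlen : x < p.length := uf_nonroot_lt hx
  have hstep' : ∀ y, y ≠ x → ufStep (p.set x (ufIter p j x)) y = ufStep p y := by
    intro y hy; rw [uf_step_set]; simp [hy]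
  have hstepx : ufStep (p.set x (ufIter p j x)) x = ufIter p j x := by
    rw [uf_step_set]; simp [hxlen]
  intro m
  induction m with
  | zero =>
    intro y hy
    exact ⟨0, (ufRoot_of_root hy).symm⟩
  | succ m ih =>
    intro y hy
    by_cases hyr : ufStep p y = y
    · exact ⟨0, (ufRoot_of_root hyr).symm⟩
    · by_cases hyx : y = x
      · subst hyx
        have hreach : ufStep p (ufIter p m (ufIter p j y)) = ufIter p m (ufIter p j y) := by
          have e1 : ufIter p m (ufIter p j y) = ufIter p (j + m) y := (ufIter_add p j m y).symm
          have e2 : ufIter p (j + m) y = ufIter p (m + 1) y := by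
            have hsplit : j + m = (m + 1) + (j - 1) := by omega
            rw [hsplit, ufIter_add, ufIter_root hy]
          rw [e1, e2]; exact hy
        obtain ⟨k, hk⟩ := ih (ufIter p j y) hreach
        refine ⟨k + 1, ?_⟩
        have hstep1 : ufIter (p.set y (ufIter p j y)) (k + 1) y
            = ufIter (p.set y (ufIter p j y)) k (ufIter p j y) := by
          rw [ufIter, hstepx]
        rw [hstep1, hk, ufRoot_iter hI]
      · have hreach : ufStep p (ufIter p m (ufStep p y)) = ufIter p m (ufStep p y) := hy
        obtain ⟨k, hk⟩ := ih (ufStep p y) hreach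
        refine ⟨k + 1, ?_⟩
        have hstep1 : ufIter (p.set x (ufIter p j x)) (k + 1) y
            = ufIter (p.set x (ufIter p j x)) k (ufStep p y) := by
          rw [ufIter, hstep' y hyx]
        rw [hstep1, hk, ufRoot_step hI]

/-- pointing a non-root `x` at a later node of its own chain preserves every root. -/
lemma uf_compress {p : List Nat} (hI : ufInv p) (hB : ufBnd p) {x : Nat}
    (hx : ufStep p x ≠ x) {j : Nat} (hj : 1 ≤ j) :
    ufInv (p.set x (ufIter p j x)) ∧ ufBnd (p.set x (ufIter p j x)) ∧
      (p.set x (ufIter p j x)).length = p.length ∧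
      ∀ y, ufRoot (p.set x (ufIter p j x)) y = ufRoot p y := by
  have hxlen : x < p.length := uf_nonroot_lt hx
  have hrootne : ∀ y, ufRoot p y ≠ x := by
    intro y he
    apply hx
    conv_lhs => rw [← he]
    rw [ufRoot_isRoot hI, he]
  have hroots' : ∀ r, ufStep p r = r → r ≠ x →
      ufStep (p.set x (ufIter p j x)) r = r := by
    intro r hr hrx
    rw [uf_step_set]; simp [hrx]; exact hr
  have hrootroot : ∀ y, ufStep (p.set x (ufIter p j x)) (ufRoot p y) = ufRoot p y :=
    fun y => hroots' _ (ufRoot_isRoot hI y) (hrootne y)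
  have hmain : ∀ y, ∃ k, ufIter (p.set x (ufIter p j x)) k y = ufRoot p y :=
    fun y => uf_compress_core hI hx hj p.length y (ufRoot_isRoot hI y)
  have hI' : ufInv (p.set x (ufIter p j x)) := by
    intro y
    obtain ⟨k, hk⟩ := hmain y
    exact ⟨k, by rw [hk]; exact hrootroot y⟩
  have heq : ∀ y, ufRoot (p.set x (ufIter p j x)) y = ufRoot p y := by
    intro y
    obtain ⟨k, hk⟩ := hmain y
    exact ufRoot_of_rootedAt hI' hk (hrootroot y)
  have hB' : ufBnd (p.set x (ufIter p j x)) := by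
    intro i hi
    rw [List.length_set] at hi ⊢
    rw [uf_step_set]
    by_cases hix : i = x
    · simp [hix, hxlen]; exact uf_bnd_iter hB hxlen j
    · simp [hix]; exact hB i hi
  exact ⟨hI', hB', by simp, heq⟩

lemma uf_union_core {p : List Nat} (hI : ufInv p) {rx ry : Nat}
    (hrx : ufStep p rx = rx) (hry : ufStep p ry = ry)
    (hxl : rx < p.length) (hne : rx ≠ ry) :
    ∀ (m y : Nat), ufStep p (ufIter p m y) = ufIter p m y →
      ∃ k, ufIter (p.set rx ry) k y = (if ufRoot p y = rx then ry else ufRoot p y) := by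
  have hstep' : ∀ y, y ≠ rx → ufStep (p.set rx ry) y = ufStep p y := by
    intro y hy; rw [uf_step_set]; simp [hy]
  have hstepx : ufStep (p.set rx ry) rx = ry := by
    rw [uf_step_set]; simp [hxl]
  have base : ∀ y, ufStep p y = y →
      ∃ k, ufIter (p.set rx ry) k y = (if ufRoot p y = rx then ry else ufRoot p y) := by
    intro y hy
    have hr : ufRoot p y = y := ufRoot_of_root hy
    by_cases hyx : y = rx
    · refine ⟨1, ?_⟩
      have h1 : ufIter (p.set rx ry) 1 y = ufStep (p.set rx ry) y := rfl
      rw [h1, hyx, hstepx, ufRoot_of_root hrx, if_pos rfl]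
    · exact ⟨0, by rw [hr, if_neg hyx]; rfl⟩
  intro m
  induction m with
  | zero => intro y hy; exact base y hy
  | succ m ih =>
    intro y hy
    by_cases hyr : ufStep p y = y
    · exact base y hyr
    · have hyx : y ≠ rx := fun he => hyr (by rw [he]; exact hrx)
      have hreach : ufStep p (ufIter p m (ufStep p y)) = ufIter p m (ufStep p y) := hy
      obtain ⟨k, hk⟩ := ih (ufStep p y) hreach
      refine ⟨k + 1, ?_⟩
      have hstep1 : ufIter (p.set rx ry) (k + 1) y
          = ufIter (p.set rx ry) k (ufStep p y) := by
        rw [ufIter, hstep' y hyx]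
      rw [hstep1, hk, ufRoot_step hI]

/-- linking root `rx` under root `ry` re-roots exactly `rx`'s class. -/
lemma uf_union {p : List Nat} (hI : ufInv p) (hB : ufBnd p) {rx ry : Nat}
    (hrx : ufStep p rx = rx) (hry : ufStep p ry = ry)
    (hxl : rx < p.length) (hyl : ry < p.length) (hne : rx ≠ ry) :
    ufInv (p.set rx ry) ∧ ufBnd (p.set rx ry) ∧ (p.set rx ry).length = p.length ∧
      ∀ y, ufRoot (p.set rx ry) y = if ufRoot p y = rx then ry else ufRoot p y := by
  have hroots' : ∀ r, ufStep p r = r → r ≠ rx → ufStep (p.set rx ry) r = r := by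
    intro r hr hrne
    rw [uf_step_set]; simp [hrne]; exact hr
  have htgt : ∀ y, ufStep (p.set rx ry) (if ufRoot p y = rx then ry else ufRoot p y)
      = (if ufRoot p y = rx then ry else ufRoot p y) := by
    intro y
    by_cases hc : ufRoot p y = rx
    · rw [if_pos hc]; exact hroots' ry hry (Ne.symm hne)
    · rw [if_neg hc]; exact hroots' _ (ufRoot_isRoot hI y) hc
  have hmain : ∀ y, ∃ k, ufIter (p.set rx ry) k y
      = (if ufRoot p y = rx then ry else ufRoot p y) :=
    fun y => uf_union_core hI hrx hry hxl hne p.length y (ufRoot_isRoot hI y)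
  have hI' : ufInv (p.set rx ry) := by
    intro y
    obtain ⟨k, hk⟩ := hmain y
    exact ⟨k, by rw [hk]; exact htgt y⟩
  have heq : ∀ y, ufRoot (p.set rx ry) y = if ufRoot p y = rx then ry else ufRoot p y := by
    intro y
    obtain ⟨k, hk⟩ := hmain y
    exact ufRoot_of_rootedAt hI' hk (htgt y)
  have hB' : ufBnd (p.set rx ry) := by
    intro i hi
    rw [List.length_set] at hi ⊢
    rw [uf_step_set]
    by_cases hix : i = rx
    · simp [hix, hxl]; exact hyl
    · simp [hix]; exact hB i hi
  exact ⟨hI', hB', by simp, heq⟩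

lemma pvFindA_spec : ∀ (fuel : Nat) (p : List Nat) (x m : Nat), ufInv p → ufBnd p →
    ufStep p (ufIter p m x) = ufIter p m x → m ≤ fuel →
    (pvFindA fuel p x).1.length = p.length ∧ ufInv (pvFindA fuel p x).1 ∧
      ufBnd (pvFindA fuel p x).1 ∧ (pvFindA fuel p x).2 = ufRoot p x ∧
      ∀ y, ufRoot (pvFindA fuel p x).1 y = ufRoot p y := by
  intro fuel
  induction fuel with
  | zero =>
    intro p x m hI hB hm hle
    have hm0 : m = 0 := by omega
    subst hm0
    have hx : ufStep p x = x := hm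
    exact ⟨rfl, hI, hB, (ufRoot_of_root hx).symm, fun y => rfl⟩
  | succ fuel ih =>
    intro p x m hI hB hm hle
    by_cases hc : p.getD x x = x
    · have heq : pvFindA (fuel+1) p x = (p, x) := by
        simp only [pvFindA]
        rw [if_neg (not_not_intro hc)]
      rw [heq]
      have hx : ufStep p x = x := hc
      exact ⟨rfl, hI, hB, (ufRoot_of_root hx).symm, fun y => rfl⟩
    · have hxne : ufStep p x ≠ x := hc
      have heq : pvFindA (fuel+1) p x
          = pvFindA fuel (p.set x (ufIter p 2 x)) (ufIter p 2 x) := by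
        simp only [pvFindA]
        rw [if_pos hc]
        rfl
      obtain ⟨hI', hB', hlen', hroots'⟩ :=
        uf_compress hI hB hxne (show (1:Nat) ≤ 2 by omega)
      have hm1 : 1 ≤ m := by
        rcases Nat.eq_zero_or_pos m with h0 | h
        · exfalso; apply hxne; rw [h0] at hm; exact hm
        · exact h
      have hiterG : ufIter p (m-1) (ufIter p 2 x) = ufIter p m x := by
        rw [← ufIter_add]
        have h2 : 2 + (m-1) = m + 1 := by omega
        rw [h2, ufIter_add p m 1 x]
        exact hm
      have havoid : ∀ s, ufIter p s (ufIter p 2 x) ≠ x := by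
        intro s
        have e : ufIter p s (ufIter p 2 x) = ufIter p (2 + s) x := (ufIter_add p 2 s x).symm
        rw [e]
        exact uf_no_return hm hxne (by omega)
      have htrans : ufIter (p.set x (ufIter p 2 x)) (m-1) (ufIter p 2 x)
          = ufIter p (m-1) (ufIter p 2 x) :=
        uf_iter_set_avoid (fun s _ => havoid s)
      have hreachG' : ufStep (p.set x (ufIter p 2 x))
            (ufIter (p.set x (ufIter p 2 x)) (m-1) (ufIter p 2 x))
          = ufIter (p.set x (ufIter p 2 x)) (m-1) (ufIter p 2 x) := by
        rw [htrans, hiterG]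
        have hne2 : ufIter p m x ≠ x := fun he => hxne (by rw [he] at hm; exact hm)
        rw [uf_step_set]; simp [hne2]; exact hm
      obtain ⟨ihlen, ihI, ihB, ihr, ihroots⟩ :=
        ih (p.set x (ufIter p 2 x)) (ufIter p 2 x) (m-1) hI' hB' hreachG' (by omega)
      rw [heq]
      refine ⟨by rw [ihlen]; simp, ihI, ihB, ?_, fun y => by rw [ihroots y, hroots' y]⟩
      rw [ihr, hroots', ufRoot_iter hI]

lemma pvFindB_spec : ∀ (fuel : Nat) (p : List Nat) (x m : Nat), ufInv p →
    ufStep p (ufIter p m x) = ufIter p m x → m ≤ fuel →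
    pvFindB fuel p x = ufRoot p x := by
  intro fuel
  induction fuel with
  | zero =>
    intro p x m hI hm hle
    have hm0 : m = 0 := by omega
    subst hm0
    exact (ufRoot_of_root hm).symm
  | succ fuel ih =>
    intro p x m hI hm hle
    by_cases hc : p.getD x x = x
    · have heq : pvFindB (fuel+1) p x = x := by
        simp only [pvFindB]
        rw [if_neg (not_not_intro hc)]
      rw [heq]
      exact (ufRoot_of_root hc).symm
    · have hxne : ufStep p x ≠ x := hc
      have hm1 : 1 ≤ m := by
        rcases Nat.eq_zero_or_pos m with h0 | h
        · exfalso; apply hxne; rw [h0] at hm; exact hm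
        · exact h
      have hreach : ufStep p (ufIter p (m-1) (ufStep p x)) = ufIter p (m-1) (ufStep p x) := by
        have e : ufIter p (m-1) (ufStep p x) = ufIter p m x := by
          conv_rhs => rw [show m = (m-1)+1 by omega]
          rw [show m - 1 + 1 = 1 + (m-1) by omega, ufIter_add p 1 (m-1) x]
          rfl
        rw [e]; exact hm
      have hrec := ih p (ufStep p x) (m-1) hI hreach (by omega)
      have heq : pvFindB (fuel+1) p x = pvFindB fuel p (ufStep p x) := by
        simp only [pvFindB]
        rw [if_pos hc]
        rfl
      rw [heq, hrec, ufRoot_step hI]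

lemma ufConn_refl (Q : List (Nat × Nat)) (y : Nat) : ufConn Q y y := Relation.EqvGen.refl y
lemma ufConn_symm {Q : List (Nat × Nat)} {y z : Nat} (h : ufConn Q y z) : ufConn Q z y :=
  Relation.EqvGen.symm _ _ h
lemma ufConn_trans {Q : List (Nat × Nat)} {y z w : Nat} (h1 : ufConn Q y z)
    (h2 : ufConn Q z w) : ufConn Q y w := Relation.EqvGen.trans _ _ _ h1 h2

lemma ufConn_mono_append {Q L : List (Nat × Nat)} {y z : Nat} (h : ufConn Q y z) :
    ufConn (Q ++ L) y z := by
  induction h with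
  | rel a b hab => exact Relation.EqvGen.rel a b (hab.imp (List.mem_append_left _) (List.mem_append_left _))
  | refl a => exact Relation.EqvGen.refl a
  | symm a b _ ih => exact Relation.EqvGen.symm _ _ ih
  | trans a b c _ _ ih1 ih2 => exact Relation.EqvGen.trans _ _ _ ih1 ih2

lemma ufConn_append_pair (Q : List (Nat × Nat)) (a b y z : Nat) :
    ufConn (Q ++ [(a, b)]) y z ↔ ufJoin (ufConn Q) a b y z := by
  constructor
  · intro h
    induction h with
    | rel u v huv =>
      rcases huv with h | h
      · rcases List.mem_append.mp h with h' | h'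
        · exact Or.inl (Relation.EqvGen.rel u v (Or.inl h'))
        · have h2 : u = a ∧ v = b := by simpa [Prod.ext_iff] using h'
          obtain ⟨rfl, rfl⟩ := h2
          exact Or.inr (Or.inl ⟨ufConn_refl Q u, ufConn_refl Q v⟩)
      · rcases List.mem_append.mp h with h' | h'
        · exact Or.inl (Relation.EqvGen.rel u v (Or.inr h'))
        · have h2 : v = a ∧ u = b := by simpa [Prod.ext_iff] using h'
          obtain ⟨rfl, rfl⟩ := h2
          exact Or.inr (Or.inr ⟨ufConn_refl Q u, ufConn_refl Q v⟩)
    | refl u => exact Or.inl (ufConn_refl Q u)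
    | symm u v _ ih =>
      rcases ih with h | ⟨h1, h2⟩ | ⟨h1, h2⟩
      · exact Or.inl (ufConn_symm h)
      · exact Or.inr (Or.inr ⟨ufConn_symm h2, ufConn_symm h1⟩)
      · exact Or.inr (Or.inl ⟨ufConn_symm h2, ufConn_symm h1⟩)
    | trans u v w _ _ ih1 ih2 =>
      rcases ih1 with h | ⟨h1, h2⟩ | ⟨h1, h2⟩ <;>
        rcases ih2 with g | ⟨g1, g2⟩ | ⟨g1, g2⟩
      · exact Or.inl (ufConn_trans h g)
      · exact Or.inr (Or.inl ⟨ufConn_trans h g1, g2⟩)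
      · exact Or.inr (Or.inr ⟨ufConn_trans h g1, g2⟩)
      · exact Or.inr (Or.inl ⟨h1, ufConn_trans h2 g⟩)
      · exact Or.inr (Or.inl ⟨h1, g2⟩)
      · exact Or.inl (ufConn_trans h1 g2)
      · exact Or.inr (Or.inr ⟨h1, ufConn_trans h2 g⟩)
      · exact Or.inl (ufConn_trans h1 g2)
      · exact Or.inr (Or.inr ⟨h1, g2⟩)
  · intro h
    have hab : ufConn (Q ++ [(a, b)]) a b :=
      Relation.EqvGen.rel a b (Or.inl (List.mem_append_right _ (List.mem_singleton_self _)))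
    rcases h with h | ⟨h1, h2⟩ | ⟨h1, h2⟩
    · exact ufConn_mono_append h
    · exact ufConn_trans (ufConn_mono_append h1)
        (ufConn_trans hab (ufConn_mono_append h2))
    · exact ufConn_trans (ufConn_mono_append h1)
        (ufConn_trans (ufConn_symm hab) (ufConn_mono_append h2))

lemma ufConn_of_subset {ps qs : List (Nat × Nat)} {y z : Nat}
    (h : ∀ a b, ((a, b) ∈ ps ∨ (b, a) ∈ ps) → ufConn qs a b)
    (hc : ufConn ps y z) : ufConn qs y z := by
  induction hc with
  | rel a b hab => exact h a b hab
  | refl a => exact Relation.EqvGen.refl a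
  | symm a b _ ih => exact ufConn_symm ih
  | trans a b c _ _ ih1 ih2 => exact ufConn_trans ih1 ih2

/-- generic run lemma: folding any union step whose effect on the root partition
    is `ufJoin` turns the partition into connectivity over the processed pairs. -/
lemma uf_run (step : List Nat → Nat × Nat → List Nat)
    (hstep : ∀ p a b, ufInv p → ufBnd p → a < p.length → b < p.length →
      (step p (a, b)).length = p.length ∧ ufInv (step p (a, b)) ∧ ufBnd (step p (a, b)) ∧
      ∀ y z, ufRoot (step p (a, b)) y = ufRoot (step p (a, b)) z ↔
        ufJoin (fun u v => ufRoot p u = ufRoot p v) a b y z) :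
    ∀ (ps Q : List (Nat × Nat)) (p : List Nat), ufInv p → ufBnd p →
      (∀ pr ∈ ps, pr.1 < p.length ∧ pr.2 < p.length) →
      (∀ y z, ufRoot p y = ufRoot p z ↔ ufConn Q y z) →
      (ps.foldl step p).length = p.length ∧ ufInv (ps.foldl step p) ∧ ufBnd (ps.foldl step p) ∧
        ∀ y z, ufRoot (ps.foldl step p) y = ufRoot (ps.foldl step p) z ↔ ufConn (Q ++ ps) y z := by
  intro ps
  induction ps with
  | nil =>
    intro Q p hI hB _ hbase
    exact ⟨rfl, hI, hB, by simpa using hbase⟩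
  | cons pr rest ih =>
    obtain ⟨a, b⟩ := pr
    intro Q p hI hB hbounds hbase
    have hpr := hbounds (a, b) (List.mem_cons_self)
    obtain ⟨hlen1, hI1, hB1, hjoin⟩ := hstep p a b hI hB hpr.1 hpr.2
    have hbase1 : ∀ y z, ufRoot (step p (a, b)) y = ufRoot (step p (a, b)) z ↔
        ufConn (Q ++ [(a, b)]) y z := by
      intro y z
      rw [ufConn_append_pair, hjoin y z]
      unfold ufJoin
      simp only []
      rw [hbase y z, hbase y a, hbase b z, hbase y b, hbase a z]
    obtain ⟨l1, i1, b1, r1⟩ := ih (Q ++ [(a, b)]) (step p (a, b)) hI1 hB1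
      (fun q hq => by rw [hlen1]; exact hbounds q (List.mem_cons_of_mem _ hq)) hbase1
    rw [List.foldl_cons]
    refine ⟨by rw [l1, hlen1], i1, b1, fun y z => ?_⟩
    rw [r1 y z, List.append_assoc, List.singleton_append]

lemma ufConn_nil (y z : Nat) : ufConn [] y z ↔ y = z := by
  constructor
  · intro h
    induction h with
    | rel u v huv => simp at huv
    | refl u => rfl
    | symm u v _ ih => exact ih.symm
    | trans u v w _ _ ih1 ih2 => exact ih1.trans ih2
  · rintro rfl; exact ufConn_refl [] y

lemma mem_zipRange {α : Type} (items : List α) (q : Nat × α) :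
    q ∈ (List.range items.length).zip items
      ↔ ∃ k, ∃ h : k < items.length, q = (k, items[k]) := by
  rw [List.mem_iff_getElem]
  constructor
  · rintro ⟨i, hi, hq⟩
    rw [List.length_zip, List.length_range, Nat.min_self] at hi
    refine ⟨i, hi, ?_⟩
    rw [← hq, List.getElem_zip, List.getElem_range]
  · rintro ⟨k, hk, rfl⟩
    refine ⟨k, ?_, ?_⟩
    · rw [List.length_zip, List.length_range, Nat.min_self]; exact hk
    · rw [List.getElem_zip, List.getElem_range]

lemma mem_drop_zipRange {α : Type} (items : List α) (m : Nat) (q : Nat × α) :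
    q ∈ ((List.range items.length).zip items).drop m
      ↔ ∃ k, m ≤ k ∧ ∃ h : k < items.length, q = (k, items[k]) := by
  rw [List.mem_iff_getElem]
  constructor
  · rintro ⟨i, hi, hq⟩
    rw [List.length_drop, List.length_zip, List.length_range, Nat.min_self] at hi
    refine ⟨m + i, by omega, by omega, ?_⟩
    rw [← hq, List.getElem_drop, List.getElem_zip, List.getElem_range]
  · rintro ⟨k, hmk, hk, rfl⟩
    refine ⟨k - m, ?_, ?_⟩
    · rw [List.length_drop, List.length_zip, List.length_range, Nat.min_self]; omega
    · rw [List.getElem_drop, List.getElem_zip, List.getElem_range]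
      simp only [Prod.mk.injEq]
      constructor
      · omega
      · congr 1; omega

def pvStepA (p : List Nat) (pr : Nat × Nat) : List Nat := pvUnionA p pr.1 pr.2

def pvStepB (p : List Nat) (pr : Nat × Nat) : List Nat :=
  let ra := pvFindB p.length p pr.1
  let rb := pvFindB p.length p pr.2
  if ra ≠ rb then p.set ra rb else p

lemma uf_join_iff {p : List Nat} (hI : ufInv p) (hB : ufBnd p) {a b : Nat}
    (ha : a < p.length) (hb : b < p.length) (q : List Nat)
    (hq : ∀ y, ufRoot q y = if ufRoot p y = ufRoot p a then ufRoot p b else ufRoot p y)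
    (hne : ufRoot p a ≠ ufRoot p b) :
    ∀ y z, ufRoot q y = ufRoot q z ↔ ufJoin (fun u v => ufRoot p u = ufRoot p v) a b y z := by
  intro y z
  rw [hq y, hq z]
  unfold ufJoin
  simp only []
  by_cases h1 : ufRoot p y = ufRoot p a <;> by_cases h2 : ufRoot p z = ufRoot p a
  · rw [if_pos h1, if_pos h2]
    constructor
    · intro _; exact Or.inl (h1.trans h2.symm)
    · intro _; rfl
  · rw [if_pos h1, if_neg h2]
    constructor
    · intro hh; exact Or.inr (Or.inl ⟨h1, hh⟩)
    · rintro (hh | ⟨hh1, hh2⟩ | ⟨hh1, hh2⟩)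
      · exact absurd (hh.symm.trans h1) h2
      · exact hh2
      · exact absurd (h1.symm.trans hh1) hne
  · rw [if_neg h1, if_pos h2]
    constructor
    · intro hh; exact Or.inr (Or.inr ⟨hh, h2.symm⟩)
    · rintro (hh | ⟨hh1, hh2⟩ | ⟨hh1, hh2⟩)
      · exact absurd (hh.trans h2) h1
      · exact absurd hh1 h1
      · exact hh1
  · rw [if_neg h1, if_neg h2]
    constructor
    · exact fun hh => Or.inl hh
    · rintro (hh | ⟨hh1, hh2⟩ | ⟨hh1, hh2⟩)
      · exact hh
      · exact absurd hh1 h1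
      · exact absurd hh2.symm h2

lemma uf_join_iff_same {p : List Nat} {a b : Nat}
    (heq : ufRoot p a = ufRoot p b) :
    ∀ y z, ufRoot p y = ufRoot p z ↔ ufJoin (fun u v => ufRoot p u = ufRoot p v) a b y z := by
  intro y z
  unfold ufJoin
  simp only []
  constructor
  · exact fun h => Or.inl h
  · rintro (h | ⟨h1, h2⟩ | ⟨h1, h2⟩)
    · exact h
    · omega
    · omega

lemma pvStepA_spec : ∀ (p : List Nat) (a b : Nat), ufInv p → ufBnd p →
    a < p.length → b < p.length →
    (pvStepA p (a, b)).length = p.length ∧ ufInv (pvStepA p (a, b)) ∧ ufBnd (pvStepA p (a, b)) ∧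
    ∀ y z, ufRoot (pvStepA p (a, b)) y = ufRoot (pvStepA p (a, b)) z ↔
      ufJoin (fun u v => ufRoot p u = ufRoot p v) a b y z := by
  intro p a b hI hB ha hb
  obtain ⟨hl1, hI1, hB1, hr1, hro1⟩ :=
    pvFindA_spec p.length p b p.length hI hB (ufRoot_isRoot hI b) le_rfl
  obtain ⟨hl2, hI2, hB2, hr2, hro2⟩ :=
    pvFindA_spec (pvFindA p.length p b).1.length (pvFindA p.length p b).1 a
      (pvFindA p.length p b).1.length hI1 hB1 (ufRoot_isRoot hI1 a) le_rfl
  have hq : pvStepA p (a, b)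
      = (pvFindA (pvFindA p.length p b).1.length (pvFindA p.length p b).1 a).1.set
          (pvFindA (pvFindA p.length p b).1.length (pvFindA p.length p b).1 a).2
          (pvFindA p.length p b).2 := rfl
  set p1 := (pvFindA p.length p b).1 with hp1
  set p2 := (pvFindA p1.length p1 a).1 with hp2
  have hrb : (pvFindA p.length p b).2 = ufRoot p b := hr1
  have hra : (pvFindA p1.length p1 a).2 = ufRoot p a := by rw [hr2, hro1]
  have hrootsp2 : ∀ y, ufRoot p2 y = ufRoot p y := fun y => by rw [hro2 y, hro1 y]
  have hlen2 : p2.length = p.length := by rw [hl2, hl1]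
  have hisr : ∀ y, ufStep p2 (ufRoot p y) = ufRoot p y := by
    intro y
    have := ufRoot_isRoot hI2 y
    rwa [hrootsp2 y] at this
  by_cases hcase : ufRoot p a = ufRoot p b
  · have hnoop : pvStepA p (a, b) = p2 := by
      rw [hq, hra, hrb]
      exact uf_set_noop (by rw [hcase]; exact hisr b)
    rw [hnoop]
    refine ⟨hlen2, hI2, hB2, ?_⟩
    intro y z
    rw [hrootsp2 y, hrootsp2 z]
    exact uf_join_iff_same hcase y z
  · have hq2 : pvStepA p (a, b) = p2.set (ufRoot p a) (ufRoot p b) := by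
      rw [hq, hra, hrb]
    have hra2 : ufStep p2 (ufRoot p a) = ufRoot p a := hisr a
    have hrb2 : ufStep p2 (ufRoot p b) = ufRoot p b := hisr b
    have hral : ufRoot p a < p2.length := by rw [hlen2]; exact uf_bnd_iter hB ha p.length
    have hrbl : ufRoot p b < p2.length := by rw [hlen2]; exact uf_bnd_iter hB hb p.length
    obtain ⟨hI3, hB3, hl3, hro3⟩ := uf_union hI2 hB2 hra2 hrb2 hral hrbl hcase
    rw [hq2]
    refine ⟨by rw [hl3, hlen2], hI3, hB3, ?_⟩
    apply uf_join_iff hI hB ha hb _ _ hcase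
    intro y
    rw [hro3 y, hrootsp2 y]

lemma pvStepB_spec : ∀ (p : List Nat) (a b : Nat), ufInv p → ufBnd p →
    a < p.length → b < p.length →
    (pvStepB p (a, b)).length = p.length ∧ ufInv (pvStepB p (a, b)) ∧ ufBnd (pvStepB p (a, b)) ∧
    ∀ y z, ufRoot (pvStepB p (a, b)) y = ufRoot (pvStepB p (a, b)) z ↔
      ufJoin (fun u v => ufRoot p u = ufRoot p v) a b y z := by
  intro p a b hI hB ha hb
  have hfa : pvFindB p.length p a = ufRoot p a :=
    pvFindB_spec p.length p a p.length hI (ufRoot_isRoot hI a) le_rfl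
  have hfb : pvFindB p.length p b = ufRoot p b :=
    pvFindB_spec p.length p b p.length hI (ufRoot_isRoot hI b) le_rfl
  by_cases hcase : ufRoot p a = ufRoot p b
  · have hnoop : pvStepB p (a, b) = p := by
      unfold pvStepB
      simp only [hfa, hfb]
      rw [if_neg (not_not_intro hcase)]
    rw [hnoop]
    exact ⟨rfl, hI, hB, uf_join_iff_same hcase⟩
  · have hq : pvStepB p (a, b) = p.set (ufRoot p a) (ufRoot p b) := by
      unfold pvStepB
      simp only [hfa, hfb]
      rw [if_pos hcase]
    have hral : ufRoot p a < p.length := uf_bnd_iter hB ha p.length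
    have hrbl : ufRoot p b < p.length := uf_bnd_iter hB hb p.length
    obtain ⟨hI3, hB3, hl3, hro3⟩ :=
      uf_union hI hB (ufRoot_isRoot hI a) (ufRoot_isRoot hI b) hral hrbl hcase
    rw [hq]
    exact ⟨hl3, hI3, hB3, uf_join_iff hI hB ha hb _ hro3 hcase⟩

def repStep (kf : Nat → Nat) (acc : List (Nat × Int)) (ig : Nat × Int) : List (Nat × Int) :=
  if acc.any (fun r => kf r.1 == kf ig.1) then acc else acc ++ [ig]

lemma rep_set (kf : Nat → Nat) : ∀ (l acc : List (Nat × Int)),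
    l.foldl (fun s ig => PySem.Set.add s (kf ig.1)) (acc.map (fun r => kf r.1))
      = (l.foldl (repStep kf) acc).map (fun r => kf r.1) := by
  intro l
  induction l with
  | nil => intro acc; rfl
  | cons ig rest ih =>
    intro acc
    simp only [List.foldl_cons]
    have hanymem : (acc.any (fun r => kf r.1 == kf ig.1) = true)
        ↔ kf ig.1 ∈ acc.map (fun r => kf r.1) := by
      rw [List.any_eq_true]
      simp [List.mem_map, beq_iff_eq]
    by_cases hmem : kf ig.1 ∈ acc.map (fun r => kf r.1)
    · rw [PySem.Set.add_of_mem hmem]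
      rw [show repStep kf acc ig = acc from by rw [repStep, if_pos (hanymem.mpr hmem)]]
      exact ih acc
    · rw [PySem.Set.add_of_not_mem hmem]
      rw [show repStep kf acc ig = acc ++ [ig] from by
        rw [repStep, if_neg (fun hc => hmem (hanymem.mp hc))]]
      have := ih (acc ++ [ig])
      rw [List.map_append] at this
      exact this

lemma rep_congr {kA kB : Nat → Nat} (h : ∀ y z, kA y = kA z ↔ kB y = kB z) :
    ∀ (l acc : List (Nat × Int)), l.foldl (repStep kA) acc = l.foldl (repStep kB) acc := by
  intro l
  induction l with
  | nil => intro acc; rfl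
  | cons ig rest ih =>
    intro acc
    simp only [List.foldl_cons]
    have hstep : repStep kA acc ig = repStep kB acc ig := by
      unfold repStep
      have hcond : ∀ r : Nat × Int, (kA r.1 == kA ig.1) = (kB r.1 == kB ig.1) := by
        intro r
        by_cases hr : kA r.1 = kA ig.1
        · simp [hr, (h r.1 ig.1).mp hr]
        · have h2 : ¬ kB r.1 = kB ig.1 := fun hc => hr ((h r.1 ig.1).mpr hc)
          simp [hr, h2]
      rw [show (fun r : Nat × Int => kA r.1 == kA ig.1) = (fun r : Nat × Int => kB r.1 == kB ig.1)
        from funext hcond]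
    rw [hstep, ih]

lemma group_closed (kf : Nat → Nat) (l : List (Nat × Int)) :
    (l.foldl (fun d ig => d.modify (kf ig.1) [] (· ++ [ig.2]))
        (PySem.Dict.empty : PySem.Dict Nat (List Int))).values
      = (l.foldl (repStep kf) []).map
          (fun r => (l.filter (fun ig => kf ig.1 == kf r.1)).map (·.2)) := by
  have hnd : (l.foldl (fun d ig => d.modify (kf ig.1) [] (· ++ [ig.2]))
      (PySem.Dict.empty : PySem.Dict Nat (List Int))).keys.Nodup :=
    PySem.Dict.nodup_keys_foldl_modify_key l (fun ig => kf ig.1) [] (fun _ ig => (· ++ [ig.2]))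
      PySem.Dict.empty PySem.Dict.nodup_keys_empty
  have hkeys : (l.foldl (fun d ig => d.modify (kf ig.1) [] (· ++ [ig.2]))
      (PySem.Dict.empty : PySem.Dict Nat (List Int))).keys
      = (l.foldl (repStep kf) []).map (fun r => kf r.1) := by
    have h1 := PySem.Dict.keys_foldl_modify_key l (fun ig => kf ig.1) [] (fun _ ig => (· ++ [ig.2]))
      PySem.Dict.empty
    rw [h1, PySem.Dict.keys_empty]
    have h2 : PySem.Set.update [] (l.map (fun ig => kf ig.1))
        = (l.map (fun ig => kf ig.1)).foldl PySem.Set.add [] := rfl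
    rw [h2, List.foldl_map]
    have h3 := rep_set kf l []
    simpa using h3
  have hget : ∀ c, (l.foldl (fun d ig => d.modify (kf ig.1) [] (· ++ [ig.2]))
      (PySem.Dict.empty : PySem.Dict Nat (List Int))).getD c []
      = (l.filter (fun ig => kf ig.1 == c)).map (·.2) := by
    intro c
    have h1 : l.foldl (fun d ig => d.modify (kf ig.1) [] (· ++ [ig.2]))
        (PySem.Dict.empty : PySem.Dict Nat (List Int))
        = (l.map (fun ig => (kf ig.1, ig.2))).foldl
            (fun d pr => d.modify pr.1 [] (· ++ [pr.2])) PySem.Dict.empty := by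
      rw [List.foldl_map]
    rw [h1, PySem.Dict.getD_foldl_modify_append, PySem.Dict.getD_empty, List.nil_append,
      List.filter_map, List.map_map]
    rfl
  rw [PySem.Dict.values_eq_map_keys _ hnd [], hkeys, List.map_map]
  apply List.map_congr_left
  intro r _
  simp only [Function.comp_apply]
  rw [hget (kf r.1)]

lemma group_values_eq {kA kB : Nat → Nat} (h : ∀ y z, kA y = kA z ↔ kB y = kB z)
    (l : List (Nat × Int)) :
    (l.foldl (fun d ig => d.modify (kA ig.1) [] (· ++ [ig.2]))
        (PySem.Dict.empty : PySem.Dict Nat (List Int))).values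
      = (l.foldl (fun d ig => d.modify (kB ig.1) [] (· ++ [ig.2]))
        (PySem.Dict.empty : PySem.Dict Nat (List Int))).values := by
  rw [group_closed kA l, group_closed kB l, rep_congr h l []]
  apply List.map_congr_left
  intro r _
  congr 1
  apply List.filter_congr
  intro ig _
  by_cases hc : kA ig.1 = kA r.1
  · simp [hc, (h ig.1 r.1).mp hc]
  · have h2 : ¬ kB ig.1 = kB r.1 := fun hc2 => hc ((h ig.1 r.1).mpr hc2)
    simp [hc, h2]

lemma groupA_eq : ∀ (l : List (Nat × Int)) (p : List Nat) (d : PySem.Dict Nat (List Int))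
    (kf : Nat → Nat), ufInv p → ufBnd p → (∀ y, ufRoot p y = kf y) →
    (l.foldl (fun (st : List Nat × PySem.Dict Nat (List Int)) ig =>
        let f := pvFindA st.1.length st.1 ig.1
        (f.1, st.2.modify f.2 [] (· ++ [ig.2]))) (p, d)).2
      = l.foldl (fun dct ig => dct.modify (kf ig.1) [] (· ++ [ig.2])) d := by
  intro l
  induction l with
  | nil => intro p d kf _ _ _; rfl
  | cons ig rest ih =>
    intro p d kf hI hB hk
    obtain ⟨hlen, hI', hB', hr, hroots⟩ :=
      pvFindA_spec p.length p ig.1 p.length hI hB (ufRoot_isRoot hI ig.1) le_rfl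
    simp only [List.foldl_cons]
    rw [ih (pvFindA p.length p ig.1).1 (d.modify (pvFindA p.length p ig.1).2 [] (· ++ [ig.2]))
      kf hI' hB' (fun y => by rw [hroots y]; exact hk y)]
    rw [hr, hk ig.1]

-- ===== from the ports' folds to pair lists =====

-- names for the ports' intermediate values (abbrevs/defs mirror the ports' let-bindings)
abbrev pvItems (gs : List (Int × List String)) : List (Int × List String) :=
  (PySem.Dict.ofList gs).items
abbrev pvGauges (gs : List (Int × List String)) : List Int := (PySem.Dict.ofList gs).keys
abbrev pvN (gs : List (Int × List String)) : Nat := (pvItems gs).length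
def pvSubSets (gs : List (Int × List String)) : PySem.Dict Int (PySem.Set String) :=
  (pvItems gs).foldl (fun sd gh => sd.insert gh.1 (PySem.Set.ofList gh.2)) PySem.Dict.empty
abbrev pvEnumG (gs : List (Int × List String)) : List (Nat × Int) :=
  (List.range (pvGauges gs).length).zip (pvGauges gs)
abbrev pvEnumI (gs : List (Int × List String)) : List (Nat × (Int × List String)) :=
  (List.range (pvN gs)).zip (pvItems gs)

def pvParentA (gs : List (Int × List String)) : List Nat :=
  (pvEnumG gs).foldl (fun p ia =>
      ((pvEnumG gs).drop (ia.1 + 1)).foldl (fun p jb =>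
        if PySem.Set.inter ((pvSubSets gs).getD ia.2 []) ((pvSubSets gs).getD jb.2 []) ≠ [] then
          pvUnionA p ia.1 jb.1
        else p) p)
    (List.range (pvGauges gs).length)

def pvBuckets (gs : List (Int × List String)) : PySem.Dict String (List Nat) :=
  (pvEnumI gs).foldl (fun b ii =>
    ii.2.2.foldl (fun b h => b.modify h [] (· ++ [ii.1])) b) PySem.Dict.empty

def pvParentB (gs : List (Int × List String)) : List Nat :=
  (pvBuckets gs).values.foldl (fun p idxs =>
      match idxs with
      | [] => p
      | r0 :: rest =>
        rest.foldl (fun p j =>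
          let ra := pvFindB p.length p r0
          let rb := pvFindB p.length p j
          if ra ≠ rb then p.set ra rb else p) p)
    (List.range (pvN gs))

def pvPairsA (gs : List (Int × List String)) : List (Nat × Nat) :=
  (pvEnumG gs).flatMap (fun ia =>
    (((pvEnumG gs).drop (ia.1 + 1)).filter (fun jb =>
        decide (PySem.Set.inter ((pvSubSets gs).getD ia.2 []) ((pvSubSets gs).getD jb.2 []) ≠ []))).map
      (fun jb => (ia.1, jb.1)))

def pairsOfBucket : List Nat → List (Nat × Nat)
  | [] => []
  | r0 :: rest => rest.map (fun j => (r0, j))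

def pvPairsB (gs : List (Int × List String)) : List (Nat × Nat) :=
  (pvBuckets gs).values.flatMap pairsOfBucket

def pvMentions (gs : List (Int × List String)) : List (String × Nat) :=
  (pvEnumI gs).flatMap (fun ii => ii.2.2.map (fun h => (h, ii.1)))

def pvShare (gs : List (Int × List String)) (i j : Nat) : Prop :=
  ∃ h, h ∈ ((pvItems gs).getD i (0, [])).2 ∧ h ∈ ((pvItems gs).getD j (0, [])).2

lemma pvShare_symm {gs : List (Int × List String)} {i j : Nat} (h : pvShare gs i j) :
    pvShare gs j i := by
  obtain ⟨x, h1, h2⟩ := h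
  exact ⟨x, h2, h1⟩

lemma gauges_eq (gs : List (Int × List String)) :
    pvGauges gs = (pvItems gs).map (·.1) := rfl

lemma len_gauges (gs : List (Int × List String)) : (pvGauges gs).length = pvN gs := by
  rw [gauges_eq, List.length_map]

lemma gauges_getElem (gs : List (Int × List String)) {k : Nat} (hk : k < pvN gs) :
    (pvGauges gs)[k]'(by rw [len_gauges]; exact hk) = ((pvItems gs)[k]'hk).1 := by
  simp [gauges_eq, List.getElem_map]

lemma items_fst_nodup (gs : List (Int × List String)) : ((pvItems gs).map (·.1)).Nodup := by
  have h := PySem.Dict.nodup_keys_ofList gs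
  simpa only [PySem.Dict.keys] using h

lemma subSets_getD (gs : List (Int × List String)) {k : Nat} (hk : k < pvN gs) :
    (pvSubSets gs).getD ((pvItems gs)[k]'hk).1 []
      = PySem.Set.ofList ((pvItems gs)[k]'hk).2 := by
  have hfresh := PySem.Dict.items_foldl_insert_fresh (pvItems gs) (·.1)
      (fun gh => PySem.Set.ofList gh.2) PySem.Dict.empty
      (fun a _ => PySem.Dict.contains_empty a.1) (items_fst_nodup gs)
  have hitems : (pvSubSets gs).items
      = (pvItems gs).map (fun a => (a.1, PySem.Set.ofList a.2)) := by
    rw [pvSubSets, hfresh]; rfl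
  have hkeys : (pvSubSets gs).keys = (pvItems gs).map (·.1) := by
    show (pvSubSets gs).items.map (·.1) = _
    rw [hitems, List.map_map]; rfl
  have hmem : (((pvItems gs)[k]'hk).1, PySem.Set.ofList ((pvItems gs)[k]'hk).2)
      ∈ (pvSubSets gs).items := by
    rw [hitems]
    exact List.mem_map.mpr ⟨(pvItems gs)[k]'hk, List.getElem_mem _, rfl⟩
  exact PySem.Dict.getD_of_mem_items _ hmem (by rw [hkeys]; exact items_fst_nodup gs) []

lemma inter_ne_iff (s t : List String) :
    (PySem.Set.inter (PySem.Set.ofList s) (PySem.Set.ofList t) ≠ []) ↔ ∃ h, h ∈ s ∧ h ∈ t := by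
  constructor
  · intro hne
    obtain ⟨x, hx⟩ := List.exists_mem_of_ne_nil _ hne
    have hx2 := (PySem.Set.mem_inter _ _ x).mp hx
    exact ⟨x, (PySem.Set.mem_ofList _ _).mp hx2.1, (PySem.Set.mem_ofList _ _).mp hx2.2⟩
  · rintro ⟨h, h1, h2⟩ hnil
    have hm : h ∈ PySem.Set.inter (PySem.Set.ofList s) (PySem.Set.ofList t) :=
      (PySem.Set.mem_inter _ _ h).mpr
        ⟨(PySem.Set.mem_ofList _ _).mpr h1, (PySem.Set.mem_ofList _ _).mpr h2⟩
    rw [hnil] at hm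
    simp at hm

lemma share_getElem_iff (gs : List (Int × List String)) {i j : Nat}
    (hi : i < pvN gs) (hj : j < pvN gs) :
    pvShare gs i j
      ↔ ∃ h, h ∈ ((pvItems gs)[i]'hi).2 ∧ h ∈ ((pvItems gs)[j]'hj).2 := by
  rw [pvShare, List.getD_eq_getElem _ _ hi, List.getD_eq_getElem _ _ hj]

lemma cond_iff_share (gs : List (Int × List String)) {i j : Nat}
    (hi : i < pvN gs) (hj : j < pvN gs) :
    (PySem.Set.inter ((pvSubSets gs).getD (((pvItems gs)[i]'hi).1) [])
        ((pvSubSets gs).getD (((pvItems gs)[j]'hj).1) []) ≠ [])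
      ↔ pvShare gs i j := by
  rw [subSets_getD gs hi, subSets_getD gs hj, inter_ne_iff, share_getElem_iff gs hi hj]

lemma inner_eq (gs : List (Int × List String)) (ia : Nat × Int) :
    ∀ (l : List (Nat × Int)) (p : List Nat),
      l.foldl (fun p jb =>
          if PySem.Set.inter ((pvSubSets gs).getD ia.2 []) ((pvSubSets gs).getD jb.2 []) ≠ [] then
            pvUnionA p ia.1 jb.1
          else p) p
        = ((l.filter (fun jb =>
              decide (PySem.Set.inter ((pvSubSets gs).getD ia.2 [])
                ((pvSubSets gs).getD jb.2 []) ≠ []))).map (fun jb => (ia.1, jb.1))).foldl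
            pvStepA p := by
  intro l
  induction l with
  | nil => intro p; rfl
  | cons jb rest ih =>
    intro p
    by_cases hc : PySem.Set.inter ((pvSubSets gs).getD ia.2 []) ((pvSubSets gs).getD jb.2 []) ≠ []
    · rw [List.foldl_cons, if_pos hc, List.filter_cons, if_pos (by simpa using hc),
        List.map_cons, List.foldl_cons]
      exact ih (pvUnionA p ia.1 jb.1)
    · rw [List.foldl_cons, if_neg hc, List.filter_cons, if_neg (by simpa using hc)]
      exact ih p

lemma loopA_eq (gs : List (Int × List String)) :
    pvParentA gs = (pvPairsA gs).foldl pvStepA (List.range (pvGauges gs).length) := by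
  rw [pvParentA, pvPairsA, List.foldl_flatMap]
  exact List.foldl_ext _ _ _ (fun p ia _ => inner_eq gs ia _ p)

lemma loopB_eq (gs : List (Int × List String)) :
    pvParentB gs = (pvPairsB gs).foldl pvStepB (List.range (pvN gs)) := by
  rw [pvParentB, pvPairsB, List.foldl_flatMap]
  apply List.foldl_ext
  intro p idxs _
  cases idxs with
  | nil => rfl
  | cons r0 rest =>
    show rest.foldl _ p = (rest.map (fun j => (r0, j))).foldl pvStepB p
    rw [List.foldl_map]
    rfl

lemma mem_pairsA (gs : List (Int × List String)) (a0 b0 : Nat) :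
    (a0, b0) ∈ pvPairsA gs ↔ a0 < b0 ∧ b0 < pvN gs ∧ pvShare gs a0 b0 := by
  rw [pvPairsA, List.mem_flatMap]
  constructor
  · rintro ⟨ia, hia, hmem⟩
    rw [List.mem_map] at hmem
    obtain ⟨jb, hjb, heq⟩ := hmem
    rw [List.mem_filter] at hjb
    obtain ⟨hjb1, hjb2⟩ := hjb
    rw [mem_zipRange] at hia
    obtain ⟨i, hi, rfl⟩ := hia
    rw [mem_drop_zipRange] at hjb1
    obtain ⟨j, hij, hj, rfl⟩ := hjb1
    obtain ⟨rfl, rfl⟩ : i = a0 ∧ j = b0 := by simpa using heq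
    have hi' : i < pvN gs := by rw [len_gauges] at hi; exact hi
    have hj' : j < pvN gs := by rw [len_gauges] at hj; exact hj
    refine ⟨by omega, hj', ?_⟩
    have hcond := of_decide_eq_true hjb2
    rw [gauges_getElem gs hi', gauges_getElem gs hj'] at hcond
    exact (cond_iff_share gs hi' hj').mp hcond
  · rintro ⟨hab, hb, hshare⟩
    have ha : a0 < pvN gs := by omega
    have hag : a0 < (pvGauges gs).length := by rw [len_gauges]; exact ha
    have hbg : b0 < (pvGauges gs).length := by rw [len_gauges]; exact hb
    refine ⟨(a0, (pvGauges gs)[a0]'hag), (mem_zipRange _ _).mpr ⟨a0, hag, rfl⟩, ?_⟩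
    rw [List.mem_map]
    refine ⟨(b0, (pvGauges gs)[b0]'hbg), ?_, rfl⟩
    rw [List.mem_filter]
    constructor
    · exact (mem_drop_zipRange _ _ _).mpr ⟨b0, by omega, hbg, rfl⟩
    · apply decide_eq_true
      show PySem.Set.inter ((pvSubSets gs).getD ((pvGauges gs)[a0]'hag) [])
          ((pvSubSets gs).getD ((pvGauges gs)[b0]'hbg) []) ≠ []
      rw [gauges_getElem gs ha, gauges_getElem gs hb]
      exact (cond_iff_share gs ha hb).mpr hshare

lemma buckets_eq (gs : List (Int × List String)) :
    pvBuckets gs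
      = (pvMentions gs).foldl (fun b pr => b.modify pr.1 [] (· ++ [pr.2])) PySem.Dict.empty := by
  rw [pvBuckets, pvMentions, List.foldl_flatMap]
  apply List.foldl_ext
  intro b ii _
  rw [List.foldl_map]

lemma buckets_getD (gs : List (Int × List String)) (h : String) :
    (pvBuckets gs).getD h [] = ((pvMentions gs).filter (fun pr => pr.1 == h)).map (·.2) := by
  rw [buckets_eq, PySem.Dict.getD_foldl_modify_append, PySem.Dict.getD_empty, List.nil_append]

lemma mem_mentions (gs : List (Int × List String)) (h0 : String) (m : Nat) :
    (h0, m) ∈ pvMentions gs ↔ ∃ hk : m < pvN gs, h0 ∈ ((pvItems gs)[m]'hk).2 := by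
  rw [pvMentions, List.mem_flatMap]
  constructor
  · rintro ⟨ii, hii, hmem⟩
    rw [mem_zipRange] at hii
    obtain ⟨k, hk, rfl⟩ := hii
    rw [List.mem_map] at hmem
    obtain ⟨x, hx, heq⟩ := hmem
    obtain ⟨rfl, rfl⟩ : x = h0 ∧ k = m := by simpa using heq
    exact ⟨hk, hx⟩
  · rintro ⟨hk, hmem⟩
    refine ⟨(m, (pvItems gs)[m]'hk), (mem_zipRange _ _).mpr ⟨m, hk, rfl⟩, ?_⟩
    rw [List.mem_map]
    exact ⟨h0, hmem, rfl⟩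

lemma buckets_keys (gs : List (Int × List String)) :
    (pvBuckets gs).keys = PySem.Set.ofList ((pvMentions gs).map (·.1)) := by
  rw [buckets_eq]
  have h1 := PySem.Dict.keys_foldl_modify_key (pvMentions gs) (·.1) []
    (fun _ pr => (· ++ [pr.2])) PySem.Dict.empty
  rw [h1, PySem.Dict.keys_empty]
  rw [PySem.Set.ofList_eq_foldl]
  rfl

lemma buckets_keys_nodup (gs : List (Int × List String)) : (pvBuckets gs).keys.Nodup := by
  rw [buckets_eq]
  exact PySem.Dict.nodup_keys_foldl_modify_key (pvMentions gs) (·.1) []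
    (fun _ pr => (· ++ [pr.2])) PySem.Dict.empty PySem.Dict.nodup_keys_empty

lemma bucket_mem_char (gs : List (Int × List String)) (h : String) (m : Nat) :
    m ∈ (pvBuckets gs).getD h [] ↔ ∃ hk : m < pvN gs, h ∈ ((pvItems gs)[m]'hk).2 := by
  rw [buckets_getD, List.mem_map]
  constructor
  · rintro ⟨pr, hpr, rfl⟩
    rw [List.mem_filter] at hpr
    obtain ⟨hmem, hbeq⟩ := hpr
    have hpr1 : pr.1 = h := by simpa using hbeq
    have : (h, pr.2) ∈ pvMentions gs := by rw [← hpr1]; exact hmem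
    exact (mem_mentions gs h pr.2).mp this
  · rintro ⟨hk, hmem⟩
    refine ⟨(h, m), ?_, rfl⟩
    rw [List.mem_filter]
    exact ⟨(mem_mentions gs h m).mpr ⟨hk, hmem⟩, by simp⟩

lemma bucket_in_values (gs : List (Int × List String)) {h : String}
    (hh : h ∈ (pvBuckets gs).keys) : (pvBuckets gs).getD h [] ∈ (pvBuckets gs).values := by
  rw [PySem.Dict.values_eq_map_keys _ (buckets_keys_nodup gs) []]
  exact List.mem_map.mpr ⟨h, hh, rfl⟩

lemma value_is_bucket (gs : List (Int × List String)) {l : List Nat}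
    (hl : l ∈ (pvBuckets gs).values) : ∃ h, l = (pvBuckets gs).getD h [] := by
  rw [PySem.Dict.values_eq_map_keys _ (buckets_keys_nodup gs) []] at hl
  obtain ⟨h, _, rfl⟩ := List.mem_map.mp hl
  exact ⟨h, rfl⟩

lemma same_bucket_conn (gs : List (Int × List String)) {l : List Nat}
    (hl : l ∈ (pvBuckets gs).values) {i j : Nat} (hi : i ∈ l) (hj : j ∈ l) :
    ufConn (pvPairsB gs) i j := by
  cases l with
  | nil => simp at hi
  | cons r0 rest =>
    have hr : ∀ m, m ∈ r0 :: rest → ufConn (pvPairsB gs) r0 m := by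
      intro m hm
      rcases List.mem_cons.mp hm with rfl | hm'
      · exact ufConn_refl _ m
      · refine Relation.EqvGen.rel _ _ (Or.inl ?_)
        rw [pvPairsB, List.mem_flatMap]
        exact ⟨r0 :: rest, hl, by
          show (r0, m) ∈ rest.map (fun j => (r0, j))
          exact List.mem_map.mpr ⟨m, hm', rfl⟩⟩
    exact ufConn_trans (ufConn_symm (hr i hi)) (hr j hj)

lemma share_conn_B (gs : List (Int × List String)) {i j : Nat}
    (hi : i < pvN gs) (hj : j < pvN gs) (hs : pvShare gs i j) :
    ufConn (pvPairsB gs) i j := by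
  obtain ⟨h, h1, h2⟩ := (share_getElem_iff gs hi hj).mp hs
  have hm1 : (h, i) ∈ pvMentions gs := (mem_mentions gs h i).mpr ⟨hi, h1⟩
  have hkey : h ∈ (pvBuckets gs).keys := by
    rw [buckets_keys, PySem.Set.mem_ofList]
    exact List.mem_map.mpr ⟨(h, i), hm1, rfl⟩
  exact same_bucket_conn gs (bucket_in_values gs hkey)
    ((bucket_mem_char gs h i).mpr ⟨hi, h1⟩) ((bucket_mem_char gs h j).mpr ⟨hj, h2⟩)

lemma pairB_elim (gs : List (Int × List String)) {a b : Nat}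
    (hab : (a, b) ∈ pvPairsB gs) :
    a < pvN gs ∧ b < pvN gs ∧ pvShare gs a b := by
  rw [pvPairsB, List.mem_flatMap] at hab
  obtain ⟨l, hl, hmem⟩ := hab
  obtain ⟨h, rfl⟩ := value_is_bucket gs hl
  cases hcase : (pvBuckets gs).getD h [] with
  | nil => rw [hcase] at hmem; simp [pairsOfBucket] at hmem
  | cons r0 rest =>
    rw [hcase] at hmem
    have hmem2 : (a, b) ∈ rest.map (fun j => (r0, j)) := hmem
    rw [List.mem_map] at hmem2
    obtain ⟨j, hjr, heq⟩ := hmem2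
    have h12 : r0 = a ∧ j = b := by simpa using heq
    have hamem : a ∈ (pvBuckets gs).getD h [] := by
      rw [hcase, ← h12.1]; exact List.mem_cons_self
    have hbmem : b ∈ (pvBuckets gs).getD h [] := by
      rw [hcase, ← h12.2]; exact List.mem_cons_of_mem _ hjr
    obtain ⟨ha, ha2⟩ := (bucket_mem_char gs h a).mp hamem
    obtain ⟨hb, hb2⟩ := (bucket_mem_char gs h b).mp hbmem
    exact ⟨ha, hb, (share_getElem_iff gs ha hb).mpr ⟨h, ha2, hb2⟩⟩

lemma share_conn_A (gs : List (Int × List String)) {i j : Nat}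
    (hi : i < pvN gs) (hj : j < pvN gs) (hs : pvShare gs i j) :
    ufConn (pvPairsA gs) i j := by
  rcases Nat.lt_trichotomy i j with h | h | h
  · exact Relation.EqvGen.rel _ _ (Or.inl ((mem_pairsA gs i j).mpr ⟨h, hj, hs⟩))
  · subst h; exact ufConn_refl _ i
  · exact Relation.EqvGen.rel _ _
      (Or.inr ((mem_pairsA gs j i).mpr ⟨h, hi, pvShare_symm hs⟩))

lemma connAB (gs : List (Int × List String)) (y z : Nat) :
    ufConn (pvPairsA gs) y z ↔ ufConn (pvPairsB gs) y z := by
  constructor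
  · intro hc
    refine ufConn_of_subset (fun a b hab => ?_) hc
    rcases hab with h | h
    · rw [mem_pairsA] at h
      exact share_conn_B gs (by omega) h.2.1 h.2.2
    · rw [mem_pairsA] at h
      exact ufConn_symm (share_conn_B gs (by omega) h.2.1 h.2.2)
  · intro hc
    refine ufConn_of_subset (fun a b hab => ?_) hc
    rcases hab with h | h
    · obtain ⟨ha, hb, hs⟩ := pairB_elim gs h
      exact share_conn_A gs ha hb hs
    · obtain ⟨ha, hb, hs⟩ := pairB_elim gs h
      exact ufConn_symm (share_conn_A gs ha hb hs)

lemma ufStep_range (n z : Nat) : ufStep (List.range n) z = z := by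
  rcases Nat.lt_or_ge z n with h | h
  · rw [ufStep, List.getD_eq_getElem _ _ (by rw [List.length_range]; exact h),
      List.getElem_range]
  · rw [ufStep, List.getD_eq_default _ _ (by rw [List.length_range]; exact h)]

lemma ufInv_range (n : Nat) : ufInv (List.range n) := fun x => ⟨0, ufStep_range n x⟩

lemma ufBnd_range (n : Nat) : ufBnd (List.range n) := by
  intro i hi
  rw [ufStep_range]
  exact hi

lemma ufRoot_range (n y : Nat) : ufRoot (List.range n) y = y :=
  ufRoot_of_root (ufStep_range n y)

lemma parentA_facts (gs : List (Int × List String)) :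
    ufInv (pvParentA gs) ∧ ufBnd (pvParentA gs) ∧
      ∀ y z, ufRoot (pvParentA gs) y = ufRoot (pvParentA gs) z ↔ ufConn (pvPairsA gs) y z := by
  have hbounds : ∀ pr ∈ pvPairsA gs, pr.1 < (List.range (pvGauges gs).length).length ∧
      pr.2 < (List.range (pvGauges gs).length).length := by
    rintro ⟨a, b⟩ hmem
    rw [mem_pairsA] at hmem
    rw [List.length_range, len_gauges]
    exact ⟨by omega, hmem.2.1⟩
  have hbase : ∀ y z, ufRoot (List.range (pvGauges gs).length) y
      = ufRoot (List.range (pvGauges gs).length) z ↔ ufConn [] y z := by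
    intro y z
    rw [ufRoot_range, ufRoot_range, ufConn_nil]
  obtain ⟨_, hI, hB, hiff⟩ := uf_run pvStepA pvStepA_spec (pvPairsA gs) []
    (List.range (pvGauges gs).length) (ufInv_range _) (ufBnd_range _) hbounds hbase
  rw [← loopA_eq] at hI hB hiff
  exact ⟨hI, hB, fun y z => by rw [hiff y z, List.nil_append]⟩

lemma parentB_facts (gs : List (Int × List String)) :
    ufInv (pvParentB gs) ∧ ufBnd (pvParentB gs) ∧
      ∀ y z, ufRoot (pvParentB gs) y = ufRoot (pvParentB gs) z ↔ ufConn (pvPairsB gs) y z := by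
  have hbounds : ∀ pr ∈ pvPairsB gs, pr.1 < (List.range (pvN gs)).length ∧
      pr.2 < (List.range (pvN gs)).length := by
    rintro ⟨a, b⟩ hmem
    obtain ⟨ha, hb, _⟩ := pairB_elim gs hmem
    rw [List.length_range]
    exact ⟨ha, hb⟩
  have hbase : ∀ y z, ufRoot (List.range (pvN gs)) y
      = ufRoot (List.range (pvN gs)) z ↔ ufConn [] y z := by
    intro y z
    rw [ufRoot_range, ufRoot_range, ufConn_nil]
  obtain ⟨_, hI, hB, hiff⟩ := uf_run pvStepB pvStepB_spec (pvPairsB gs) []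
    (List.range (pvN gs)) (ufInv_range _) (ufBnd_range _) hbounds hbase
  rw [← loopB_eq] at hI hB hiff
  exact ⟨hI, hB, fun y z => by rw [hiff y z, List.nil_append]⟩

theorem nesting_groups_py_spec : Claim_equal_nesting_groups_py := by
  intro gs _
  unfold Spec_nesting_groups_py
  obtain ⟨hIA, hBA, hA⟩ := parentA_facts gs
  obtain ⟨hIB, hBB, hB⟩ := parentB_facts gs
  have hfib : ∀ y z, ufRoot (pvParentA gs) y = ufRoot (pvParentA gs) z
      ↔ ufRoot (pvParentB gs) y = ufRoot (pvParentB gs) z := by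
    intro y z
    rw [hA y z, connAB gs y z, ← hB y z]
  have hL : nesting_groups_py gs
      = ((pvEnumG gs).foldl (fun (st : List Nat × PySem.Dict Nat (List Int)) ig =>
          let f := pvFindA st.1.length st.1 ig.1
          (f.1, st.2.modify f.2 [] (· ++ [ig.2]))) (pvParentA gs, PySem.Dict.empty)).2.values := rfl
  have hR : nesting_groups_py_alt gs
      = ((pvEnumI gs).foldl (fun (g : PySem.Dict Nat (List Int)) ii =>
          g.modify (pvFindB (pvParentB gs).length (pvParentB gs) ii.1) [] (· ++ [ii.2.1]))
          PySem.Dict.empty).values := rfl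
  rw [hL, hR]
  rw [groupA_eq (pvEnumG gs) (pvParentA gs) PySem.Dict.empty (ufRoot (pvParentA gs)) hIA hBA
    (fun y => rfl)]
  have hfind : ∀ i : Nat, pvFindB (pvParentB gs).length (pvParentB gs) i
      = ufRoot (pvParentB gs) i :=
    fun i => pvFindB_spec (pvParentB gs).length (pvParentB gs) i (pvParentB gs).length hIB
      (ufRoot_isRoot hIB i) le_rfl
  have hR2 : ((pvEnumI gs).foldl (fun (g : PySem.Dict Nat (List Int)) ii =>
        g.modify (pvFindB (pvParentB gs).length (pvParentB gs) ii.1) [] (· ++ [ii.2.1]))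
        PySem.Dict.empty)
      = ((pvEnumI gs).foldl (fun (g : PySem.Dict Nat (List Int)) ii =>
        g.modify (ufRoot (pvParentB gs) ii.1) [] (· ++ [ii.2.1])) PySem.Dict.empty) := by
    apply List.foldl_ext
    intro d ii _
    rw [hfind ii.1]
  rw [hR2]
  have hzip : pvEnumG gs = (pvEnumI gs).map (fun ii => (ii.1, ii.2.1)) := by
    show (List.range (pvGauges gs).length).zip (pvGauges gs) = _
    rw [len_gauges]
    conv_lhs => rw [gauges_eq]
    rw [List.zip_map_right]
    exact List.map_congr_left (fun ii _ => rfl)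
  have hR3 : ((pvEnumI gs).foldl (fun (g : PySem.Dict Nat (List Int)) ii =>
        g.modify (ufRoot (pvParentB gs) ii.1) [] (· ++ [ii.2.1])) PySem.Dict.empty)
      = ((pvEnumG gs).foldl (fun (d : PySem.Dict Nat (List Int)) ig =>
        d.modify (ufRoot (pvParentB gs) ig.1) [] (· ++ [ig.2])) PySem.Dict.empty) := by
    rw [hzip, List.foldl_map]
  rw [hR3]
  exact group_values_eq hfib (pvEnumG gs)
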